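-- pv_equiv track=rewrite | github.com/pypi-data/pypi-mirror-79 | packages/Uliweb3/Uliweb3-0.2.tar.gz/Uliweb3-0.2/uliweb/utils/common.py | trim_path
-- ===== SOURCE A (Python) =====
-- def trim_path(path, length=30):
--     """
--     trim path to specified length, for example:
--     >>> a = '/project/apps/default/settings.ini'
--     >>> trim_path(a)
--     '.../apps/default/settings.ini'
--
--     The real length will be length-4, it'll left '.../' for output.
--     """
--     s = path.replace('\\', '/').split('/')
--     t = -1
--     for i in range(len(s)-1, -1, -1):
--         t = len(s[i]) + t + 1
--         if t > length-4:
--             break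
--     return '.../' + '/'.join(s[i+1:])
-- ===== SOURCE B (Python) =====
-- def trim_path(path, length=30):
--     segs = path.replace('\\', '/').split('/')
--     for j in range(1, len(segs) + 1):
--         rest = '/'.join(segs[j:])
--         if len(rest) <= length - 4:
--             return '.../' + rest
--     return '.../'
-- ===== Notes on version B (the rewrite author's own statement) =====
-- stated objective: simpler
-- what changed: Replaces A's backward single-pass length accumulator (counting suffix length down from the last segment and breaking past the budget) with a forward scan that drops leading segments and returns the first joined suffix that fits in length-4.
import Mathlib
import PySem

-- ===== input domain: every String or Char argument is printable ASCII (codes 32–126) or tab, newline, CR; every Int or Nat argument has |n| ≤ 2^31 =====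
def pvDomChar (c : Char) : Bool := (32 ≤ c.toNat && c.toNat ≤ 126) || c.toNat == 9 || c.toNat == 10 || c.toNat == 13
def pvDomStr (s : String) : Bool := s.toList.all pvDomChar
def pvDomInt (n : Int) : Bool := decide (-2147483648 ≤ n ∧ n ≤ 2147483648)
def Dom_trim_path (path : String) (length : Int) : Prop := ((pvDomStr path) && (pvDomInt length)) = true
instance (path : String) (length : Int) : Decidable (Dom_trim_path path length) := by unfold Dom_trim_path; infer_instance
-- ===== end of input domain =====

-- B replaces A's backward length accumulator with a forward "drop leading segments until the
-- remainder fits" scan; objective: simpler (no threaded counter, the fitting test is explicit).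

-- ===== PORT A =====
-- Python's for-loop over range(len(s)-1, -1, -1) with an accumulator t and a break;
-- the function returns the loop variable i at the break (or 0 after falling through).
-- s[i] is always in range in A (i comes from range over valid indices), so getD is exact.
def trimLoopA (s : List String) (length : Int) : Nat → Int → Nat
  | i, t =>
    let t' := PySem.Str.len (s.getD i "") + t + 1
    if t' > length - 4 then i
    else
      match i with
      | 0 => 0
      | i' + 1 => trimLoopA s length i' t'

def trim_path (path : String) (length : Int) : String :=
  -- sep "/" ≠ "" so split? is always some; getD's default is never used
  let s := (PySem.Str.split? (PySem.Str.replace path "\\" "/") "/").getD [""]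
  let i := trimLoopA s length (s.length - 1) (-1)
  ".../" ++ PySem.Str.join "/" (List.drop (i + 1) s)

-- ===== PORT B =====
-- forward scan j = 1, 2, …, len(segs): first joined suffix segs[j:] with len ≤ length-4 wins
def trimLoopB (s : List String) (length : Int) (j : Nat) : String :=
  if j ≤ s.length then
    -- Python's local 'rest' inlined (it is used twice, unchanged)
    if PySem.Str.len (PySem.Str.join "/" (List.drop j s)) ≤ length - 4 then
      ".../" ++ PySem.Str.join "/" (List.drop j s)
    else trimLoopB s length (j + 1)
  else ".../"
termination_by s.length + 1 - j

def trim_path_alt (path : String) (length : Int) : String :=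
  -- sep "/" ≠ "" so split? is always some; getD's default is never used
  let segs := (PySem.Str.split? (PySem.Str.replace path "\\" "/") "/").getD [""]
  trimLoopB segs length 1

-- ===== PRECONDITION & SPEC =====
def Spec_trim_path (path : String) (length : Int) (out : String) : Prop := out = trim_path_alt path length
instance (path : String) (length : Int) (out : String) : Decidable (Spec_trim_path path length out) := by unfold Spec_trim_path; infer_instance

-- ===== CLAIM (what is proved, stated in full; the proofs are below) =====
def Claim_equal_trim_path : Prop := ∀ (path : String) (length : Int), Dom_trim_path path length → Spec_trim_path path length (trim_path path length)

-- ===== LEMMAS AND PROOFS =====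

-- length (as Int) of the joined suffix s[j:]
def suffLen (s : List String) (j : Nat) : Int :=
  PySem.Str.len (PySem.Str.join "/" (List.drop j s))

theorem suffLen_def (s : List String) (j : Nat) :
    PySem.Str.len (PySem.Str.join "/" (List.drop j s)) = suffLen s j := rfl

theorem suffLen_of_ge (s : List String) (j : Nat) (h : s.length ≤ j) : suffLen s j = 0 := by
  simp [suffLen, List.drop_eq_nil_of_le h, PySem.Str.len_eq, PySem.Str.toList_join,
    PySem.Chars.join_nil]

theorem suffLen_nonneg (s : List String) (j : Nat) : 0 ≤ suffLen s j := by
  simp [suffLen, PySem.Str.len_eq]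

theorem suffLen_eq (s : List String) (j : Nat) (h : j < s.length) :
    suffLen s j = PySem.Str.len s[j] + (if j + 1 = s.length then 0 else 1 + suffLen s (j + 1)) := by
  unfold suffLen
  rw [List.drop_eq_getElem_cons h]
  by_cases hj : j + 1 = s.length
  · have hd : List.drop (j + 1) s = [] := List.drop_eq_nil_of_le (by omega)
    simp [PySem.Str.len_eq, PySem.Str.toList_join, PySem.Chars.join_singleton, hj]
  · obtain ⟨b, l, hd⟩ : ∃ b l, List.drop (j + 1) s = b :: l := by
      cases hdd : List.drop (j + 1) s with
      | nil => exfalso; rw [List.drop_eq_nil_iff] at hdd; omega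
      | cons b l => exact ⟨b, l, rfl⟩
    simp [hd, hj, PySem.Str.len_eq, PySem.Str.toList_join, PySem.Chars.join_cons_cons]
    ring

theorem suffLen_succ_le (s : List String) (j : Nat) : suffLen s (j + 1) ≤ suffLen s j := by
  by_cases h : j < s.length
  · rw [suffLen_eq s j h]
    have h1 := suffLen_nonneg s (j + 1)
    have h2 : (0 : Int) ≤ PySem.Str.len s[j] := by simp [PySem.Str.len_eq]
    by_cases hj : j + 1 = s.length
    · rw [suffLen_of_ge s (j + 1) (by omega)]
      simp [hj]
    · simp [hj]; omega
  · rw [suffLen_of_ge s j (by omega), suffLen_of_ge s (j + 1) (by omega)]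

theorem suffLen_anti (s : List String) (k j : Nat) (h : k ≤ j) : suffLen s j ≤ suffLen s k := by
  induction j with
  | zero =>
    have hk : k = 0 := by omega
    simp [hk]
  | succ j ih =>
    rcases Nat.lt_or_ge k (j + 1) with hk | hk
    · exact le_trans (suffLen_succ_le s j) (ih (by omega))
    · have : k = j + 1 := by omega
      simp [this]

-- the accumulator A threads equals suffLen s (i+1), except for the initial -1 (where suffLen = 0)
theorem tstep (s : List String) (i : Nat) (h : i < s.length) :
    PySem.Str.len (s.getD i "") + (suffLen s (i + 1) - (if i + 1 = s.length then 1 else 0)) + 1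
      = suffLen s i := by
  rw [List.getD_eq_getElem s "" h, suffLen_eq s i h]
  by_cases hj : i + 1 = s.length
  · rw [suffLen_of_ge s (i + 1) (by omega)]
    simp [hj]
  · simp [hj]; ring

theorem loopA_none (s : List String) (length : Int) :
    ∀ i, i < s.length → (∀ k, k ≤ i → suffLen s k ≤ length - 4) →
    ∀ t, t = suffLen s (i + 1) - (if i + 1 = s.length then 1 else 0) →
    trimLoopA s length i t = 0 := by
  intro i
  induction i with
  | zero =>
    intro h hk t ht
    rw [trimLoopA]
    simp only [ht, tstep s 0 h]
    have := hk 0 (le_refl 0)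
    simp [not_lt.mpr this]
  | succ i' ih =>
    intro h hk t ht
    rw [trimLoopA]
    simp only [ht, tstep s (i' + 1) h]
    have hle := hk (i' + 1) (le_refl _)
    rw [if_neg (not_lt.mpr hle)]
    exact ih (by omega) (fun k hki => hk k (by omega)) _ (by rw [if_neg (by omega)]; ring)

theorem loopA_found (s : List String) (length : Int) :
    ∀ i, i < s.length → ∀ m, m ≤ i → length - 4 < suffLen s m →
    (∀ k, m < k → k ≤ i → suffLen s k ≤ length - 4) →
    ∀ t, t = suffLen s (i + 1) - (if i + 1 = s.length then 1 else 0) →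
    trimLoopA s length i t = m := by
  intro i
  induction i with
  | zero =>
    intro h m hm hP _ t ht
    interval_cases m
    rw [trimLoopA]
    simp only [ht, tstep s 0 h]
    simp [hP]
  | succ i' ih =>
    intro h m hm hP hmax t ht
    rw [trimLoopA]
    simp only [ht, tstep s (i' + 1) h]
    by_cases hbr : length - 4 < suffLen s (i' + 1)
    · have hmi : m = i' + 1 := by
        by_contra hne
        exact absurd (hmax (i' + 1) (by omega) (le_refl _)) (not_le.mpr hbr)
      rw [if_pos hbr, hmi]
    · rw [if_neg hbr]
      have hm' : m ≤ i' := by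
        rcases Nat.lt_or_ge m (i' + 1) with h1 | h1
        · omega
        · exfalso; have : m = i' + 1 := by omega
          rw [this] at hP; exact hbr hP
      exact ih (by omega) m hm' hP (fun k h1 h2 => hmax k h1 (by omega)) _
        (by rw [if_neg (by omega)]; ring)

theorem loopB_found (s : List String) (length : Int) :
    ∀ d a, a + d ≤ s.length → suffLen s (a + d) ≤ length - 4 →
    (∀ k, a ≤ k → k < a + d → length - 4 < suffLen s k) →
    trimLoopB s length a = ".../" ++ PySem.Str.join "/" (List.drop (a + d) s) := by
  intro d
  induction d with
  | zero =>
    intro a h hfit _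
    rw [trimLoopB, suffLen_def]
    simp only [Nat.add_zero] at h hfit ⊢
    rw [if_pos h, if_pos hfit]
  | succ d ih =>
    intro a h hfit hbig
    rw [trimLoopB, suffLen_def]
    rw [if_pos (by omega)]
    have ha : length - 4 < suffLen s a := hbig a (le_refl a) (by omega)
    rw [if_neg (not_le.mpr ha)]
    have := ih (a + 1) (by omega) (by rw [show a + 1 + d = a + (d + 1) by omega]; exact hfit)
      (fun k h1 h2 => hbig k (by omega) (by omega))
    rw [this, show a + 1 + d = a + (d + 1) by omega]

theorem loopB_allP (s : List String) (length : Int) :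
    ∀ d a, a + d = s.length + 1 → (∀ k, a ≤ k → k ≤ s.length → length - 4 < suffLen s k) →
    trimLoopB s length a = ".../" := by
  intro d
  induction d with
  | zero =>
    intro a h _
    rw [trimLoopB]
    rw [if_neg (by omega)]
  | succ d ih =>
    intro a h hbig
    rw [trimLoopB, suffLen_def]
    rw [if_pos (by omega)]
    rw [if_neg (not_le.mpr (hbig a (le_refl a) (by omega)))]
    exact ih (a + 1) (by omega) (fun k h1 h2 => hbig k (by omega) h2)

theorem append_join_nil : (".../" : String) ++ PySem.Str.join "/" ([] : List String) = ".../" := rfl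

theorem key (s : List String) (length : Int) :
    ".../" ++ PySem.Str.join "/" (List.drop (trimLoopA s length (s.length - 1) (-1) + 1) s)
      = trimLoopB s length 1 := by
  by_cases hn : s = []
  · subst hn
    have hA : trimLoopA [] length 0 (-1) = 0 := by
      rw [trimLoopA.eq_def]
      have h0 : PySem.Str.len (([] : List String).getD 0 "") + (-1) + 1 = 0 := by
        simp [PySem.Str.len_eq]
      simp only [h0]
      split_ifs <;> rfl
    have hB : trimLoopB [] length 1 = ".../" := by
      rw [trimLoopB]
      rw [if_neg (by simp)]
    simp only [List.length_nil, show (0 : Nat) - 1 = 0 from rfl, hA, hB]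
    rfl
  · have hlen : 1 ≤ s.length := by
      cases s with
      | nil => exact absurd rfl hn
      | cons a l => simp
    have htin : (-1 : Int) = suffLen s ((s.length - 1) + 1) - (if (s.length - 1) + 1 = s.length then 1 else 0) := by
      rw [show (s.length - 1) + 1 = s.length by omega, if_pos rfl, suffLen_of_ge s s.length (le_refl _)]
      norm_num
    by_cases h0 : suffLen s 0 ≤ length - 4
    · -- everything fits: A falls through to 0 (drops s[0]); B succeeds at j = 1
      rw [loopA_none s length (s.length - 1) (by omega)
        (fun k _ => le_trans (suffLen_anti s 0 k (Nat.zero_le k)) h0) _ htin]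
      have := loopB_found s length 0 1 (by omega)
        (by simpa using le_trans (suffLen_anti s 0 1 (by omega)) h0)
        (fun k h1 h2 => by omega)
      simpa using this.symm
    · -- some prefix is too long: A breaks at the greatest index m whose suffix is too long
      rw [not_le] at h0
      set P : Nat → Prop := fun k => length - 4 < suffLen s k with hPdef
      have hPd : DecidablePred P := fun k => by rw [hPdef]; infer_instance
      set m := Nat.findGreatest P (s.length - 1) with hm
      have hPm : P m := Nat.findGreatest_spec (Nat.zero_le _) h0
      have hmle : m ≤ s.length - 1 := Nat.findGreatest_le _
      have hmax : ∀ k, m < k → k ≤ s.length - 1 → suffLen s k ≤ length - 4 := by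
        intro k h1 h2
        by_contra hc
        exact absurd (show P k from not_le.mp hc) (Nat.findGreatest_is_greatest h1 h2)
      rw [loopA_found s length (s.length - 1) (by omega) m hmle hPm hmax _ htin]
      by_cases hfit : suffLen s (m + 1) ≤ length - 4
      · -- B stops exactly at j = m + 1
        have hB := loopB_found s length m 1 (by omega)
          (by rw [show 1 + m = m + 1 by omega]; exact hfit)
          (fun k h1 h2 => lt_of_lt_of_le hPm (suffLen_anti s k m (by omega)))
        rw [Nat.add_comm 1 m] at hB
        exact hB.symm
      · -- nothing fits: m = len-1, A returns the empty suffix, B exhausts the scan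
        rw [not_le] at hfit
        have hmtop : m = s.length - 1 := by
          by_contra hne
          exact absurd (hmax (m + 1) (by omega) (by omega)) (not_le.mpr hfit)
        have hB := loopB_allP s length s.length 1 (by omega)
          (fun k h1 h2 => by
            rcases Nat.lt_or_ge k s.length with hk | hk
            · exact lt_of_lt_of_le hPm (suffLen_anti s k m (by omega))
            · have : k = s.length := by omega
              rw [this, ← show m + 1 = s.length by omega]; exact hfit)
        rw [hB, show m + 1 = s.length by omega, List.drop_length]
        exact append_join_nil

-- ===== VERDICT (by name: the statement is the Claim_ definition above) =====
theorem trim_path_spec : Claim_equal_trim_path := by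
  intro path length _
  unfold Spec_trim_path trim_path trim_path_alt
  exact key _ length
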